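-- pv_equiv track=rewrite | github.com/yowatanabe/learn-to-code | python/155/main.py | max_median_of_odd_subarrays
-- ===== SOURCE A (Python) =====
-- def max_median_of_odd_subarrays(nums):
--     n = len(nums)
--     max_median = float("-inf")
--
--     for length in range(1, n + 1, 2):  # 奇数長の部分配列のみ
--         for i in range(n - length + 1):
--             sub = nums[i : i + length]
--             median = sorted(sub)[length // 2]
--             max_median = max(max_median, median)
--
--     return max_median
-- ===== SOURCE B (Python) =====
-- def max_median_of_odd_subarrays(nums):
--     # Every odd-length subarray's median is an element of nums, and each
--     # single element is itself the median of a length-1 subarray, so the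
--     # answer is simply the maximum element.
--     return max(nums)
-- ===== Notes on version B (the rewrite author's own statement) =====
-- stated objective: faster
-- what changed: B replaces the triple loop that sorts every odd-length subarray with a single max(nums): every median is an element of nums and every element is the median of a length-1 subarray.
-- outside the precondition, e.g. on max_median_of_odd_subarrays([]): A returns -inf, B raises ValueError
import Mathlib
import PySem

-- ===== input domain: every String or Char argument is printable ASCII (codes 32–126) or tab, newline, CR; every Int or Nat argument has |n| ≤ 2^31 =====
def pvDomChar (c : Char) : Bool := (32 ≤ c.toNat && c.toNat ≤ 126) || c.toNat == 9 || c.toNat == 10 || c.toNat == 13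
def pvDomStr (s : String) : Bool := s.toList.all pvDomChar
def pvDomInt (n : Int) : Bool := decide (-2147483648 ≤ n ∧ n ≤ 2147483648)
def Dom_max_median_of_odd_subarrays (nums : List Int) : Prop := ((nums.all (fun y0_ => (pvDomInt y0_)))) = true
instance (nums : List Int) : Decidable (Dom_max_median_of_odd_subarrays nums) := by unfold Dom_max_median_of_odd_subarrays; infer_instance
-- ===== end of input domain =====

-- B replaces A's triple loop (sort every odd-length subarray, take its middle) with max(nums);
-- A returns float('-inf') (not an int) on the empty list, which Pre_ excludes (B raises there).


-- ===== PORT A =====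
-- 'median = sorted(nums[i:i+length])[length // 2]'; the subscript is always in range here
-- (0 ≤ i ≤ n - length, so the slice has exactly `length` elements), so pyGetD with default 0 is exact.
def pvMedian (nums : List Int) (len i : Int) : Int :=
  let sub := PySem.List.slice nums (some i) (some (i + len))
  PySem.List.pyGetD (PySem.List.sorted sub (fun x => x)) (PySem.Int.floordiv len 2) 0

-- the inner 'for i in range(n - length + 1)' loop; 'max_median = float("-inf")' is modelled as
-- `none`, so 'max(max_median, median)' is the match below (Python's max over -inf/ints).
def pvInner (nums : List Int) (len : Int) (acc : Option Int) : Option Int :=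
  (PySem.List.pyRange 0 ((nums.length : Int) - len + 1)).foldl
    (fun acc2 i =>
      some (match acc2 with
            | none => pvMedian nums len i
            | some v => max v (pvMedian nums len i))) acc

def max_median_of_odd_subarrays (nums : List Int) : Int :=
  ((PySem.List.pyRange 1 ((nums.length : Int) + 1) 2).foldl
      (fun acc len => pvInner nums len acc) none).getD 0  -- getD 0 unreachable under Pre_

-- ===== PORT B =====
def max_median_of_odd_subarrays_alt (nums : List Int) : Int :=
  match nums with
  | [] => 0            -- max([]) raises ValueError; excluded by Pre_
  | x :: t => t.foldl max x

-- ===== PRECONDITION & SPEC =====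
-- Pre_ excludes only the empty list, on which A returns float('-inf') — not an int — and B's max() raises ValueError.
def Pre_max_median_of_odd_subarrays (nums : List Int) : Prop := nums ≠ []
instance (nums : List Int) : Decidable (Pre_max_median_of_odd_subarrays nums) := by unfold Pre_max_median_of_odd_subarrays; infer_instance
def pvWitness_max_median_of_odd_subarrays : List Int := [3, -1, 2]

def Spec_max_median_of_odd_subarrays (nums : List Int) (out : Int) : Prop := out = max_median_of_odd_subarrays_alt nums
instance (nums : List Int) (out : Int) : Decidable (Spec_max_median_of_odd_subarrays nums out) := by unfold Spec_max_median_of_odd_subarrays; infer_instance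

-- ===== CLAIM (what is proved, stated in full; the proofs are below) =====
def Claim_equal_max_median_of_odd_subarrays : Prop := ∀ (nums : List Int), Dom_max_median_of_odd_subarrays nums → Pre_max_median_of_odd_subarrays nums → Spec_max_median_of_odd_subarrays nums (max_median_of_odd_subarrays nums)

-- ===== LEMMAS AND PROOFS =====

-- folding 'max' through the Option accumulator, once it is `some`
theorem pv_fold_some (f : Int → Int) (l : List Int) (v : Int) :
    l.foldl (fun acc2 i => some (match acc2 with | none => f i | some w => max w (f i))) (some v)
      = some (l.foldl (fun w i => max w (f i)) v) := by
  induction l generalizing v with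
  | nil => rfl
  | cons a t ih => simp [List.foldl, ih]

-- a running max of values all ≤ M stays M
theorem pv_fold_max_fixed (f : Int → Int) (l : List Int) (M : Int)
    (h : ∀ i ∈ l, f i ≤ M) : l.foldl (fun w i => max w (f i)) M = M := by
  induction l with
  | nil => rfl
  | cons a t ih =>
    have ha := h a (List.mem_cons_self ..)
    simp only [List.foldl, max_eq_left ha]
    exact ih (fun i hi => h i (List.mem_cons_of_mem _ hi))

-- every median A computes is an element of nums
theorem pvMedian_mem (nums : List Int) {len i : Int}
    (hlen : 1 ≤ len) (hi : 0 ≤ i) (hin : i + len ≤ (nums.length : Int)) :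
    pvMedian nums len i ∈ nums := by
  show PySem.List.pyGetD (PySem.List.sorted (PySem.List.slice nums (some i) (some (i + len))) (fun x => x)) (PySem.Int.floordiv len 2) 0 ∈ nums
  have hsub : PySem.List.slice nums (some i) (some (i + len))
      = List.take ((i + len).toNat - i.toNat) (List.drop i.toNat nums) :=
    PySem.List.slice_toNat nums hi (by omega)
  have hlensub : (PySem.List.slice nums (some i) (some (i + len))).length = len.toNat := by
    rw [hsub]; simp; omega
  have hsortlen : (PySem.List.sorted (PySem.List.slice nums (some i) (some (i + len))) (fun x => x)).length = len.toNat := by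
    rw [(PySem.List.sorted_perm _ _ _).length_eq, hlensub]
  have hd0 : (0 : Int) ≤ PySem.Int.floordiv len 2 := by
    rw [PySem.Int.floordiv_eq_ediv_of_pos (by omega)]; omega
  have hd1 : PySem.Int.floordiv len 2 < ((PySem.List.sorted (PySem.List.slice nums (some i) (some (i + len))) (fun x => x)).length : Int) := by
    rw [PySem.Int.floordiv_eq_ediv_of_pos (by omega), hsortlen]; omega
  rw [PySem.List.pyGetD_eq_getElem _ _ hd0 hd1]
  exact PySem.List.mem_of_mem_slice nums _ _
    ((PySem.List.sorted_perm _ _ _).mem_iff.mp (List.getElem_mem _))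

-- for length = 1 the median of nums[i:i+1] is nums[i]
theorem pvMedian_one (nums : List Int) {i : Int}
    (hi : 0 ≤ i) (hin : i < (nums.length : Int)) :
    pvMedian nums 1 i = PySem.List.pyGetD nums i 0 := by
  show PySem.List.pyGetD (PySem.List.sorted (PySem.List.slice nums (some i) (some (i + 1))) (fun x => x)) (PySem.Int.floordiv 1 2) 0 = PySem.List.pyGetD nums i 0
  have hlt : i.toNat < nums.length := by omega
  have hsub : PySem.List.slice nums (some i) (some (i + 1)) = [nums[i.toNat]] := by
    rw [PySem.List.slice_toNat nums hi (by omega),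
        List.drop_eq_getElem_cons hlt, show (i + 1).toNat - i.toNat = 1 by omega]
    rfl
  rw [hsub]
  have hsort : PySem.List.sorted [nums[i.toNat]] (fun x : Int => x) = [nums[i.toNat]] := by
    simp [PySem.List.sorted, PySem.List.insertBy]
  rw [hsort, show PySem.Int.floordiv 1 2 = 0 by decide,
      PySem.List.pyGetD_eq_getElem _ _ le_rfl (by simp),
      PySem.List.pyGetD_eq_getElem nums 0 hi hin]
  rfl

-- the first outer iteration (length = 1) turns the accumulator into some (max of nums)
theorem pvInner_one (x : Int) (t : List Int) :
    pvInner (x :: t) 1 none = some (t.foldl max x) := by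
  unfold pvInner
  have hcongr := PySem.List.foldl_congr_mem (PySem.List.pyRange 0 (((x :: t).length : Int) - 1 + 1))
    (fun (acc2 : Option Int) i => some (match acc2 with
          | none => pvMedian (x :: t) 1 i
          | some v => max v (pvMedian (x :: t) 1 i)))
    (fun (acc2 : Option Int) i => some (match acc2 with
          | none => PySem.List.pyGetD (x :: t) i 0
          | some v => max v (PySem.List.pyGetD (x :: t) i 0))) none ?_
  · rw [hcongr, show ((x :: t).length : Int) - 1 + 1 = PySem.List.len (x :: t) by simp [PySem.List.len]]
    refine (PySem.List.foldl_pyRange_pyGetD (x :: t) 0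
      (fun (acc : Option Int) (v : Int) => some (match acc with | none => v | some w => max w v))
      none le_rfl).trans ?_
    simp only [Int.toNat_zero, List.drop_zero, List.foldl_cons]
    exact pv_fold_some (fun y => y) t x
  · intro acc i hi
    rw [PySem.List.mem_pyRange_one] at hi
    simp only [pvMedian_one (x :: t) hi.1 (by omega : i < ((x :: t).length : Int))]

-- once the accumulator holds the maximum, every later iteration keeps it
theorem pvInner_fixed (nums : List Int) (M : Int) {len : Int} (hlen : 1 ≤ len)
    (hM : ∀ y ∈ nums, y ≤ M) : pvInner nums len (some M) = some M := by
  unfold pvInner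
  rw [pv_fold_some (pvMedian nums len)]
  congr 1
  apply pv_fold_max_fixed
  intro i hi
  rw [PySem.List.mem_pyRange_one] at hi
  exact hM _ (pvMedian_mem nums hlen hi.1 (by omega))

-- the whole outer loop after the first iteration is the identity on some M
theorem pv_outer_fixed (nums : List Int) (l : List Int) (M : Int)
    (h : ∀ len ∈ l, 1 ≤ len) (hM : ∀ y ∈ nums, y ≤ M) :
    l.foldl (fun acc len => pvInner nums len acc) (some M) = some M := by
  induction l with
  | nil => rfl
  | cons a t ih =>
    simp only [List.foldl, pvInner_fixed nums M (h a (List.mem_cons_self ..)) hM]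
    exact ih (fun len hl => h len (List.mem_cons_of_mem _ hl))

-- ===== VERDICT (by name: the statement is the Claim_ definition above) =====
theorem max_median_of_odd_subarrays_spec : Claim_equal_max_median_of_odd_subarrays := by
  intro nums _ hpre
  match nums with
  | [] => exact absurd rfl hpre
  | x :: t =>
    show max_median_of_odd_subarrays (x :: t) = t.foldl max x
    unfold max_median_of_odd_subarrays
    have h1 : (1 : Int) < ((x :: t).length : Int) + 1 := by simp
    rw [PySem.List.pyRange_of_pos 1 (((x :: t).length : Int) + 1) (by omega : (0:Int) < 2)]
    simp only [if_pos h1]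
    have hM : ∀ y ∈ (x :: t), y ≤ t.foldl max x := by
      intro y hy
      rcases List.mem_cons.mp hy with h | h
      · exact h ▸ (PySem.List.le_foldl_max t x).1
      · exact (PySem.List.le_foldl_max t x).2 y h
    -- peel the first iteration (length = 1), then show the rest keeps some (max of nums)
    obtain ⟨k, hk⟩ : ∃ k, (((((x :: t).length : Int) + 1) - 1 + 2 - 1) / 2).toNat = k + 1 := by
      refine ⟨(((((x :: t).length : Int) + 1) - 1 + 2 - 1) / 2).toNat - 1, ?_⟩
      have : (1 : Int) ≤ ((((x :: t).length : Int) + 1) - 1 + 2 - 1) / 2 := by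
        apply Int.le_ediv_iff_mul_le (by omega) |>.mpr; simp
      omega
    rw [hk, List.range_succ_eq_map]
    simp only [List.map_cons, List.foldl_cons, Nat.cast_zero, mul_zero, add_zero, List.map_map]
    rw [pvInner_one x t]
    rw [pv_outer_fixed (x :: t) _ (t.foldl max x) ?_ hM]
    · rfl
    · intro len hlen
      simp only [List.mem_map, Function.comp, List.mem_range] at hlen
      obtain ⟨j, _, rfl⟩ := hlen
      have : (0:Int) ≤ (j:Int) := Int.natCast_nonneg j
      omega
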